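-- pv_equiv track=rewrite | github.com/gabsprogrammer/DreamServer | dream-server/installers/mobile/android-local-server.py | _safe_shell_allowed
-- ===== SOURCE A (Python) =====
-- def _safe_shell_allowed(argv: list[str]) -> bool:
--     allowed_shapes = (
--         ("am", "start"),
--         ("cmd", "package", "resolve-activity"),
--         ("cmd", "package", "list"),
--         ("dumpsys", "activity"),
--         ("dumpsys", "package"),
--         ("dumpsys", "window"),
--         ("getprop",),
--         ("input", "keyevent"),
--         ("input", "swipe"),
--         ("input", "tap"),
--         ("input", "text"),
--         ("monkey",),
--         ("pm", "list", "packages"),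
--         ("pm", "path"),
--         ("settings", "get"),
--         ("termux-clipboard-get",),
--         ("termux-clipboard-set",),
--         ("termux-open",),
--         ("termux-open-url",),
--         ("termux-share",),
--         ("termux-toast",),
--     )
--     return any(tuple(argv[: len(shape)]) == shape for shape in allowed_shapes)
-- ===== SOURCE B (Python) =====
-- # B: walk the argv tokens through a prefix trie of the allowed shapes.
-- # No allowed shape is a proper prefix of another, so a node with no
-- # children (an empty dict) marks exactly the end of an allowed shape.
-- _TRIE = {
--     "am": {"start": {}},
--     "cmd": {"package": {"resolve-activity": {}, "list": {}}},
--     "dumpsys": {"activity": {}, "package": {}, "window": {}},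
--     "getprop": {},
--     "input": {"keyevent": {}, "swipe": {}, "tap": {}, "text": {}},
--     "monkey": {},
--     "pm": {"list": {"packages": {}}, "path": {}},
--     "settings": {"get": {}},
--     "termux-clipboard-get": {},
--     "termux-clipboard-set": {},
--     "termux-open": {},
--     "termux-open-url": {},
--     "termux-share": {},
--     "termux-toast": {},
-- }
--
--
-- def _safe_shell_allowed(argv: list[str]) -> bool:
--     node = _TRIE
--     for tok in argv:
--         node = node.get(tok)
--         if node is None:
--             return False
--         if not node:  # reached a leaf: a complete allowed shape
--             return True
--     return False
-- ===== Notes on version B (the rewrite author's own statement) =====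
-- stated objective: alternative
-- what changed: B builds a prefix trie of the allowed shapes (nested dicts, leaf = complete shape) and walks the argv tokens through it, instead of A's scan over all 21 shapes comparing each prefix for equality; this is correct because no allowed shape is a proper prefix of another, so reaching a leaf is exactly matching a shape.
import Mathlib
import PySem

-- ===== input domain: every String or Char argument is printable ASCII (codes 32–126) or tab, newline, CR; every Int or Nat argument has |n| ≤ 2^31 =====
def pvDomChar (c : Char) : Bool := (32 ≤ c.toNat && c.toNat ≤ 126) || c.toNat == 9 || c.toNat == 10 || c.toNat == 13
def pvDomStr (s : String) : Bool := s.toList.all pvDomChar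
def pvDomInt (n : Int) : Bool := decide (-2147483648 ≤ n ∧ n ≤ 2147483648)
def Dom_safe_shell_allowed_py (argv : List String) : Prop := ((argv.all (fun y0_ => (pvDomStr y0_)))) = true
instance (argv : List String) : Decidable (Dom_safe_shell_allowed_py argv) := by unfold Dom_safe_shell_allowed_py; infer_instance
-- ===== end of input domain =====

-- B walks argv through a prefix trie of the allowed shapes (leaf = accept) instead of A's scan over all 21 shapes (alternative; same behaviour).

-- ===== PORT A =====
-- A's tuple of allowed shapes (tuples → lists of strings)
def pvShapesA : List (List String) :=
  [["am", "start"],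
   ["cmd", "package", "resolve-activity"],
   ["cmd", "package", "list"],
   ["dumpsys", "activity"],
   ["dumpsys", "package"],
   ["dumpsys", "window"],
   ["getprop"],
   ["input", "keyevent"],
   ["input", "swipe"],
   ["input", "tap"],
   ["input", "text"],
   ["monkey"],
   ["pm", "list", "packages"],
   ["pm", "path"],
   ["settings", "get"],
   ["termux-clipboard-get"],
   ["termux-clipboard-set"],
   ["termux-open"],
   ["termux-open-url"],
   ["termux-share"],
   ["termux-toast"]]

-- argv[:len(shape)] with len(shape) ≥ 0 is exactly List.take
def safe_shell_allowed_py (argv : List String) : Bool :=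
  pvShapesA.any (fun shape => argv.take shape.length == shape)

-- ===== PORT B =====
-- B's nested-dict trie: a node is its children dict (string → node);
-- a mutual pair encodes the nesting (no nested inductives allowed)
mutual
inductive PvTrie where
  | mk : PvTList → PvTrie
inductive PvTList where
  | nil : PvTList
  | cons : String → PvTrie → PvTList → PvTList
end

-- dict literal helper (just notation for nested dict literals)
def pvTListOf : List (String × PvTrie) → PvTList
  | [] => .nil
  | (k, v) :: r => .cons k v (pvTListOf r)

-- node.get(tok): first-match lookup in the children dict
def pvTGet? : PvTList → String → Option PvTrie
  | .nil, _ => none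
  | .cons k v r, t => if t == k then some v else pvTGet? r t

-- `not node` on a dict: true iff the dict is empty
def pvTEmpty : PvTrie → Bool
  | .mk .nil => true
  | .mk (.cons _ _ _) => false

-- B's trie literal _TRIE
def pvTrieB : PvTrie := .mk (pvTListOf
  [("am", .mk (pvTListOf [("start", .mk .nil)])),
   ("cmd", .mk (pvTListOf [("package", .mk (pvTListOf [("resolve-activity", .mk .nil), ("list", .mk .nil)]))])),
   ("dumpsys", .mk (pvTListOf [("activity", .mk .nil), ("package", .mk .nil), ("window", .mk .nil)])),
   ("getprop", .mk .nil),
   ("input", .mk (pvTListOf [("keyevent", .mk .nil), ("swipe", .mk .nil), ("tap", .mk .nil), ("text", .mk .nil)])),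
   ("monkey", .mk .nil),
   ("pm", .mk (pvTListOf [("list", .mk (pvTListOf [("packages", .mk .nil)])), ("path", .mk .nil)])),
   ("settings", .mk (pvTListOf [("get", .mk .nil)])),
   ("termux-clipboard-get", .mk .nil),
   ("termux-clipboard-set", .mk .nil),
   ("termux-open", .mk .nil),
   ("termux-open-url", .mk .nil),
   ("termux-share", .mk .nil),
   ("termux-toast", .mk .nil)])

-- the `for tok in argv` loop: descend, fail on a missing key, accept on a leaf
def pvWalk : PvTrie → List String → Bool
  | _, [] => false
  | .mk ch, tok :: rest =>
    match pvTGet? ch tok with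
    | none => false
    | some child => if pvTEmpty child then true else pvWalk child rest

def safe_shell_allowed_py_alt (argv : List String) : Bool :=
  pvWalk pvTrieB argv

-- ===== PRECONDITION & SPEC =====
def Spec_safe_shell_allowed_py (argv : List String) (out : Bool) : Prop := out = safe_shell_allowed_py_alt argv
instance (argv : List String) (out : Bool) : Decidable (Spec_safe_shell_allowed_py argv out) := by unfold Spec_safe_shell_allowed_py; infer_instance

-- ===== CLAIM (what is proved, stated in full; the proofs are below) =====
def Claim_equal_safe_shell_allowed_py : Prop := ∀ (argv : List String), Dom_safe_shell_allowed_py argv → Spec_safe_shell_allowed_py argv (safe_shell_allowed_py argv)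

-- ===== LEMMAS AND PROOFS =====

-- one unfolding step of the trie walk, per children-list constructor
theorem pvWalk_node (k : String) (v : PvTrie) (r : PvTList) (tok : String) (rest : List String) :
    pvWalk (.mk (.cons k v r)) (tok :: rest)
      = if tok == k then (if pvTEmpty v then true else pvWalk v rest)
        else pvWalk (.mk r) (tok :: rest) := by
  by_cases h : tok == k <;> simp [pvWalk, pvTGet?, h]

theorem pvWalk_nil_node (tok : String) (rest : List String) :
    pvWalk (.mk .nil) (tok :: rest) = false := rfl

theorem pvWalk_nil (t : PvTrie) : pvWalk t [] = false := by cases t; rfl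

set_option maxHeartbeats 1000000 in
set_option maxRecDepth 4000 in
theorem pv_eq1 (a : String) :
    safe_shell_allowed_py [a] = safe_shell_allowed_py_alt [a] := by
  have e1 : ∀ s : String, ((([a]).take 1) == [s]) = (a == s && true) := fun _ => rfl
  have e2 : ∀ s t : String, ((([a]).take 2) == [s,t]) = (a == s && false) := fun _ _ => rfl
  have e3 : ∀ s t u : String, ((([a]).take 3) == [s,t,u]) = (a == s && false) := fun _ _ _ => rfl
  simp only [safe_shell_allowed_py, safe_shell_allowed_py_alt, pvShapesA,
    List.any_cons, List.any_nil, List.length_cons, List.length_nil, Nat.reduceAdd,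
    e1, e2, e3,
    pvTrieB, pvTListOf, pvWalk_node, pvWalk_nil_node, pvWalk_nil, pvTEmpty,
    Bool.false_eq_true, if_false, if_true,
    Bool.and_true, Bool.and_false, Bool.or_false]
  clear e1 e2 e3
  rw [Bool.eq_iff_iff]
  simp only [Bool.or_eq_true, Bool.and_eq_true, beq_iff_eq]
  by_cases h1 : a = "am"
  · subst h1
    first
    | decide
    | (simp only [String.reduceEq, if_true, if_false, Bool.false_eq_true,
         eq_self_iff_true, false_or, or_false, true_or, or_true, false_and,
         and_false, true_and, and_true]
       try exact Iff.rfl)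
  by_cases h2 : a = "cmd"
  · subst h2
    first
    | decide
    | (simp only [String.reduceEq, if_true, if_false, Bool.false_eq_true,
         eq_self_iff_true, false_or, or_false, true_or, or_true, false_and,
         and_false, true_and, and_true]
       try exact Iff.rfl)
  by_cases h3 : a = "dumpsys"
  · subst h3
    first
    | decide
    | (simp only [String.reduceEq, if_true, if_false, Bool.false_eq_true,
         eq_self_iff_true, false_or, or_false, true_or, or_true, false_and,
         and_false, true_and, and_true]
       try exact Iff.rfl)
  by_cases h4 : a = "getprop"
  · subst h4
    first
    | decide
    | (simp only [String.reduceEq, if_true, if_false, Bool.false_eq_true,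
         eq_self_iff_true, false_or, or_false, true_or, or_true, false_and,
         and_false, true_and, and_true]
       try exact Iff.rfl)
  by_cases h5 : a = "input"
  · subst h5
    first
    | decide
    | (simp only [String.reduceEq, if_true, if_false, Bool.false_eq_true,
         eq_self_iff_true, false_or, or_false, true_or, or_true, false_and,
         and_false, true_and, and_true]
       try exact Iff.rfl)
  by_cases h6 : a = "monkey"
  · subst h6
    first
    | decide
    | (simp only [String.reduceEq, if_true, if_false, Bool.false_eq_true,
         eq_self_iff_true, false_or, or_false, true_or, or_true, false_and,
         and_false, true_and, and_true]
       try exact Iff.rfl)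
  by_cases h7 : a = "pm"
  · subst h7
    first
    | decide
    | (simp only [String.reduceEq, if_true, if_false, Bool.false_eq_true,
         eq_self_iff_true, false_or, or_false, true_or, or_true, false_and,
         and_false, true_and, and_true]
       try exact Iff.rfl)
  by_cases h8 : a = "settings"
  · subst h8
    first
    | decide
    | (simp only [String.reduceEq, if_true, if_false, Bool.false_eq_true,
         eq_self_iff_true, false_or, or_false, true_or, or_true, false_and,
         and_false, true_and, and_true]
       try exact Iff.rfl)
  by_cases h9 : a = "termux-clipboard-get"
  · subst h9
    first
    | decide
    | (simp only [String.reduceEq, if_true, if_false, Bool.false_eq_true,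
         eq_self_iff_true, false_or, or_false, true_or, or_true, false_and,
         and_false, true_and, and_true]
       try exact Iff.rfl)
  by_cases h10 : a = "termux-clipboard-set"
  · subst h10
    first
    | decide
    | (simp only [String.reduceEq, if_true, if_false, Bool.false_eq_true,
         eq_self_iff_true, false_or, or_false, true_or, or_true, false_and,
         and_false, true_and, and_true]
       try exact Iff.rfl)
  by_cases h11 : a = "termux-open"
  · subst h11
    first
    | decide
    | (simp only [String.reduceEq, if_true, if_false, Bool.false_eq_true,
         eq_self_iff_true, false_or, or_false, true_or, or_true, false_and,
         and_false, true_and, and_true]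
       try exact Iff.rfl)
  by_cases h12 : a = "termux-open-url"
  · subst h12
    first
    | decide
    | (simp only [String.reduceEq, if_true, if_false, Bool.false_eq_true,
         eq_self_iff_true, false_or, or_false, true_or, or_true, false_and,
         and_false, true_and, and_true]
       try exact Iff.rfl)
  by_cases h13 : a = "termux-share"
  · subst h13
    first
    | decide
    | (simp only [String.reduceEq, if_true, if_false, Bool.false_eq_true,
         eq_self_iff_true, false_or, or_false, true_or, or_true, false_and,
         and_false, true_and, and_true]
       try exact Iff.rfl)
  by_cases h14 : a = "termux-toast"
  · subst h14
    first
    | decide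
    | (simp only [String.reduceEq, if_true, if_false, Bool.false_eq_true,
         eq_self_iff_true, false_or, or_false, true_or, or_true, false_and,
         and_false, true_and, and_true]
       try exact Iff.rfl)
  simp only [eq_false h1, eq_false h2, eq_false h3, eq_false h4, eq_false h5, eq_false h6, eq_false h7, eq_false h8, eq_false h9, eq_false h10, eq_false h11, eq_false h12, eq_false h13, eq_false h14, String.reduceEq, if_true, if_false, Bool.false_eq_true, false_or, or_false, false_and, and_false, true_and, and_true]
  try exact Iff.rfl

set_option maxHeartbeats 1000000 in
set_option maxRecDepth 4000 in
theorem pv_eq2 (a b : String) :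
    safe_shell_allowed_py [a, b] = safe_shell_allowed_py_alt [a, b] := by
  have e1 : ∀ s : String, ((([a, b]).take 1) == [s]) = (a == s && true) := fun _ => rfl
  have e2 : ∀ s t : String, ((([a, b]).take 2) == [s,t]) = (a == s && (b == t && true)) := fun _ _ => rfl
  have e3 : ∀ s t u : String, ((([a, b]).take 3) == [s,t,u]) = (a == s && (b == t && false)) := fun _ _ _ => rfl
  simp only [safe_shell_allowed_py, safe_shell_allowed_py_alt, pvShapesA,
    List.any_cons, List.any_nil, List.length_cons, List.length_nil, Nat.reduceAdd,
    e1, e2, e3,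
    pvTrieB, pvTListOf, pvWalk_node, pvWalk_nil_node, pvWalk_nil, pvTEmpty,
    Bool.false_eq_true, if_false, if_true,
    Bool.and_true, Bool.and_false, Bool.or_false]
  clear e1 e2 e3
  rw [Bool.eq_iff_iff]
  simp only [Bool.or_eq_true, Bool.and_eq_true, beq_iff_eq]
  by_cases h15 : a = "am"
  · subst h15
    by_cases h16 : b = "start"
    · subst h16
      first
      | decide
      | (simp only [String.reduceEq, if_true, if_false, Bool.false_eq_true,
           eq_self_iff_true, false_or, or_false, true_or, or_true, false_and,
           and_false, true_and, and_true]
         try exact Iff.rfl)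
    simp only [eq_false h16, String.reduceEq, if_true, if_false, Bool.false_eq_true, false_or, or_false, false_and, and_false, true_and, and_true]
    try exact Iff.rfl
  by_cases h17 : a = "cmd"
  · subst h17
    by_cases h18 : b = "package"
    · subst h18
      first
      | decide
      | (simp only [String.reduceEq, if_true, if_false, Bool.false_eq_true,
           eq_self_iff_true, false_or, or_false, true_or, or_true, false_and,
           and_false, true_and, and_true]
         try exact Iff.rfl)
    simp only [eq_false h18, String.reduceEq, if_true, if_false, Bool.false_eq_true, false_or, or_false, false_and, and_false, true_and, and_true]
    try exact Iff.rfl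
  by_cases h19 : a = "dumpsys"
  · subst h19
    by_cases h20 : b = "activity"
    · subst h20
      first
      | decide
      | (simp only [String.reduceEq, if_true, if_false, Bool.false_eq_true,
           eq_self_iff_true, false_or, or_false, true_or, or_true, false_and,
           and_false, true_and, and_true]
         try exact Iff.rfl)
    by_cases h21 : b = "package"
    · subst h21
      first
      | decide
      | (simp only [String.reduceEq, if_true, if_false, Bool.false_eq_true,
           eq_self_iff_true, false_or, or_false, true_or, or_true, false_and,
           and_false, true_and, and_true]
         try exact Iff.rfl)
    by_cases h22 : b = "window"
    · subst h22
      first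
      | decide
      | (simp only [String.reduceEq, if_true, if_false, Bool.false_eq_true,
           eq_self_iff_true, false_or, or_false, true_or, or_true, false_and,
           and_false, true_and, and_true]
         try exact Iff.rfl)
    simp only [eq_false h20, eq_false h21, eq_false h22, String.reduceEq, if_true, if_false, Bool.false_eq_true, false_or, or_false, false_and, and_false, true_and, and_true]
    try exact Iff.rfl
  by_cases h23 : a = "getprop"
  · subst h23
    first
    | decide
    | (simp only [String.reduceEq, if_true, if_false, Bool.false_eq_true,
         eq_self_iff_true, false_or, or_false, true_or, or_true, false_and,
         and_false, true_and, and_true]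
       try exact Iff.rfl)
  by_cases h24 : a = "input"
  · subst h24
    by_cases h25 : b = "keyevent"
    · subst h25
      first
      | decide
      | (simp only [String.reduceEq, if_true, if_false, Bool.false_eq_true,
           eq_self_iff_true, false_or, or_false, true_or, or_true, false_and,
           and_false, true_and, and_true]
         try exact Iff.rfl)
    by_cases h26 : b = "swipe"
    · subst h26
      first
      | decide
      | (simp only [String.reduceEq, if_true, if_false, Bool.false_eq_true,
           eq_self_iff_true, false_or, or_false, true_or, or_true, false_and,
           and_false, true_and, and_true]
         try exact Iff.rfl)
    by_cases h27 : b = "tap"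
    · subst h27
      first
      | decide
      | (simp only [String.reduceEq, if_true, if_false, Bool.false_eq_true,
           eq_self_iff_true, false_or, or_false, true_or, or_true, false_and,
           and_false, true_and, and_true]
         try exact Iff.rfl)
    by_cases h28 : b = "text"
    · subst h28
      first
      | decide
      | (simp only [String.reduceEq, if_true, if_false, Bool.false_eq_true,
           eq_self_iff_true, false_or, or_false, true_or, or_true, false_and,
           and_false, true_and, and_true]
         try exact Iff.rfl)
    simp only [eq_false h25, eq_false h26, eq_false h27, eq_false h28, String.reduceEq, if_true, if_false, Bool.false_eq_true, false_or, or_false, false_and, and_false, true_and, and_true]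
    try exact Iff.rfl
  by_cases h29 : a = "monkey"
  · subst h29
    first
    | decide
    | (simp only [String.reduceEq, if_true, if_false, Bool.false_eq_true,
         eq_self_iff_true, false_or, or_false, true_or, or_true, false_and,
         and_false, true_and, and_true]
       try exact Iff.rfl)
  by_cases h30 : a = "pm"
  · subst h30
    by_cases h31 : b = "list"
    · subst h31
      first
      | decide
      | (simp only [String.reduceEq, if_true, if_false, Bool.false_eq_true,
           eq_self_iff_true, false_or, or_false, true_or, or_true, false_and,
           and_false, true_and, and_true]
         try exact Iff.rfl)
    by_cases h32 : b = "path"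
    · subst h32
      first
      | decide
      | (simp only [String.reduceEq, if_true, if_false, Bool.false_eq_true,
           eq_self_iff_true, false_or, or_false, true_or, or_true, false_and,
           and_false, true_and, and_true]
         try exact Iff.rfl)
    simp only [eq_false h31, eq_false h32, String.reduceEq, if_true, if_false, Bool.false_eq_true, false_or, or_false, false_and, and_false, true_and, and_true]
    try exact Iff.rfl
  by_cases h33 : a = "settings"
  · subst h33
    by_cases h34 : b = "get"
    · subst h34
      first
      | decide
      | (simp only [String.reduceEq, if_true, if_false, Bool.false_eq_true,
           eq_self_iff_true, false_or, or_false, true_or, or_true, false_and,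
           and_false, true_and, and_true]
         try exact Iff.rfl)
    simp only [eq_false h34, String.reduceEq, if_true, if_false, Bool.false_eq_true, false_or, or_false, false_and, and_false, true_and, and_true]
    try exact Iff.rfl
  by_cases h35 : a = "termux-clipboard-get"
  · subst h35
    first
    | decide
    | (simp only [String.reduceEq, if_true, if_false, Bool.false_eq_true,
         eq_self_iff_true, false_or, or_false, true_or, or_true, false_and,
         and_false, true_and, and_true]
       try exact Iff.rfl)
  by_cases h36 : a = "termux-clipboard-set"
  · subst h36
    first
    | decide
    | (simp only [String.reduceEq, if_true, if_false, Bool.false_eq_true,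
         eq_self_iff_true, false_or, or_false, true_or, or_true, false_and,
         and_false, true_and, and_true]
       try exact Iff.rfl)
  by_cases h37 : a = "termux-open"
  · subst h37
    first
    | decide
    | (simp only [String.reduceEq, if_true, if_false, Bool.false_eq_true,
         eq_self_iff_true, false_or, or_false, true_or, or_true, false_and,
         and_false, true_and, and_true]
       try exact Iff.rfl)
  by_cases h38 : a = "termux-open-url"
  · subst h38
    first
    | decide
    | (simp only [String.reduceEq, if_true, if_false, Bool.false_eq_true,
         eq_self_iff_true, false_or, or_false, true_or, or_true, false_and,
         and_false, true_and, and_true]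
       try exact Iff.rfl)
  by_cases h39 : a = "termux-share"
  · subst h39
    first
    | decide
    | (simp only [String.reduceEq, if_true, if_false, Bool.false_eq_true,
         eq_self_iff_true, false_or, or_false, true_or, or_true, false_and,
         and_false, true_and, and_true]
       try exact Iff.rfl)
  by_cases h40 : a = "termux-toast"
  · subst h40
    first
    | decide
    | (simp only [String.reduceEq, if_true, if_false, Bool.false_eq_true,
         eq_self_iff_true, false_or, or_false, true_or, or_true, false_and,
         and_false, true_and, and_true]
       try exact Iff.rfl)
  simp only [eq_false h15, eq_false h17, eq_false h19, eq_false h23, eq_false h24, eq_false h29, eq_false h30, eq_false h33, eq_false h35, eq_false h36, eq_false h37, eq_false h38, eq_false h39, eq_false h40, String.reduceEq, if_true, if_false, Bool.false_eq_true, false_or, or_false, false_and, and_false, true_and, and_true]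
  try exact Iff.rfl

set_option maxHeartbeats 1000000 in
set_option maxRecDepth 4000 in
theorem pv_eq3 (a b c : String) (rest : List String) :
    safe_shell_allowed_py (a::b::c::rest) = safe_shell_allowed_py_alt (a::b::c::rest) := by
  have e1 : ∀ s : String, ((((a::b::c::rest)).take 1) == [s]) = (a == s && true) := fun _ => rfl
  have e2 : ∀ s t : String, ((((a::b::c::rest)).take 2) == [s,t]) = (a == s && (b == t && true)) := fun _ _ => rfl
  have e3 : ∀ s t u : String, ((((a::b::c::rest)).take 3) == [s,t,u]) = (a == s && (b == t && (c == u && true))) := fun _ _ _ => rfl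
  simp only [safe_shell_allowed_py, safe_shell_allowed_py_alt, pvShapesA,
    List.any_cons, List.any_nil, List.length_cons, List.length_nil, Nat.reduceAdd,
    e1, e2, e3,
    pvTrieB, pvTListOf, pvWalk_node, pvWalk_nil_node, pvWalk_nil, pvTEmpty,
    Bool.false_eq_true, if_false, if_true,
    Bool.and_true, Bool.and_false, Bool.or_false]
  clear e1 e2 e3
  rw [Bool.eq_iff_iff]
  simp only [Bool.or_eq_true, Bool.and_eq_true, beq_iff_eq]
  by_cases h41 : a = "am"
  · subst h41
    by_cases h42 : b = "start"
    · subst h42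
      first
      | decide
      | (simp only [String.reduceEq, if_true, if_false, Bool.false_eq_true,
           eq_self_iff_true, false_or, or_false, true_or, or_true, false_and,
           and_false, true_and, and_true]
         try exact Iff.rfl)
    simp only [eq_false h42, String.reduceEq, if_true, if_false, Bool.false_eq_true, false_or, or_false, false_and, and_false, true_and, and_true]
    try exact Iff.rfl
  by_cases h43 : a = "cmd"
  · subst h43
    by_cases h44 : b = "package"
    · subst h44
      by_cases h45 : c = "resolve-activity"
      · subst h45
        first
        | decide
        | (simp only [String.reduceEq, if_true, if_false, Bool.false_eq_true,
             eq_self_iff_true, false_or, or_false, true_or, or_true, false_and,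
             and_false, true_and, and_true]
           try exact Iff.rfl)
      by_cases h46 : c = "list"
      · subst h46
        first
        | decide
        | (simp only [String.reduceEq, if_true, if_false, Bool.false_eq_true,
             eq_self_iff_true, false_or, or_false, true_or, or_true, false_and,
             and_false, true_and, and_true]
           try exact Iff.rfl)
      simp only [eq_false h45, eq_false h46, String.reduceEq, if_true, if_false, Bool.false_eq_true, false_or, or_false, false_and, and_false, true_and, and_true]
      try exact Iff.rfl
    simp only [eq_false h44, String.reduceEq, if_true, if_false, Bool.false_eq_true, false_or, or_false, false_and, and_false, true_and, and_true]
    try exact Iff.rfl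
  by_cases h47 : a = "dumpsys"
  · subst h47
    by_cases h48 : b = "activity"
    · subst h48
      first
      | decide
      | (simp only [String.reduceEq, if_true, if_false, Bool.false_eq_true,
           eq_self_iff_true, false_or, or_false, true_or, or_true, false_and,
           and_false, true_and, and_true]
         try exact Iff.rfl)
    by_cases h49 : b = "package"
    · subst h49
      first
      | decide
      | (simp only [String.reduceEq, if_true, if_false, Bool.false_eq_true,
           eq_self_iff_true, false_or, or_false, true_or, or_true, false_and,
           and_false, true_and, and_true]
         try exact Iff.rfl)
    by_cases h50 : b = "window"
    · subst h50
      first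
      | decide
      | (simp only [String.reduceEq, if_true, if_false, Bool.false_eq_true,
           eq_self_iff_true, false_or, or_false, true_or, or_true, false_and,
           and_false, true_and, and_true]
         try exact Iff.rfl)
    simp only [eq_false h48, eq_false h49, eq_false h50, String.reduceEq, if_true, if_false, Bool.false_eq_true, false_or, or_false, false_and, and_false, true_and, and_true]
    try exact Iff.rfl
  by_cases h51 : a = "getprop"
  · subst h51
    first
    | decide
    | (simp only [String.reduceEq, if_true, if_false, Bool.false_eq_true,
         eq_self_iff_true, false_or, or_false, true_or, or_true, false_and,
         and_false, true_and, and_true]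
       try exact Iff.rfl)
  by_cases h52 : a = "input"
  · subst h52
    by_cases h53 : b = "keyevent"
    · subst h53
      first
      | decide
      | (simp only [String.reduceEq, if_true, if_false, Bool.false_eq_true,
           eq_self_iff_true, false_or, or_false, true_or, or_true, false_and,
           and_false, true_and, and_true]
         try exact Iff.rfl)
    by_cases h54 : b = "swipe"
    · subst h54
      first
      | decide
      | (simp only [String.reduceEq, if_true, if_false, Bool.false_eq_true,
           eq_self_iff_true, false_or, or_false, true_or, or_true, false_and,
           and_false, true_and, and_true]
         try exact Iff.rfl)
    by_cases h55 : b = "tap"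
    · subst h55
      first
      | decide
      | (simp only [String.reduceEq, if_true, if_false, Bool.false_eq_true,
           eq_self_iff_true, false_or, or_false, true_or, or_true, false_and,
           and_false, true_and, and_true]
         try exact Iff.rfl)
    by_cases h56 : b = "text"
    · subst h56
      first
      | decide
      | (simp only [String.reduceEq, if_true, if_false, Bool.false_eq_true,
           eq_self_iff_true, false_or, or_false, true_or, or_true, false_and,
           and_false, true_and, and_true]
         try exact Iff.rfl)
    simp only [eq_false h53, eq_false h54, eq_false h55, eq_false h56, String.reduceEq, if_true, if_false, Bool.false_eq_true, false_or, or_false, false_and, and_false, true_and, and_true]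
    try exact Iff.rfl
  by_cases h57 : a = "monkey"
  · subst h57
    first
    | decide
    | (simp only [String.reduceEq, if_true, if_false, Bool.false_eq_true,
         eq_self_iff_true, false_or, or_false, true_or, or_true, false_and,
         and_false, true_and, and_true]
       try exact Iff.rfl)
  by_cases h58 : a = "pm"
  · subst h58
    by_cases h59 : b = "list"
    · subst h59
      by_cases h60 : c = "packages"
      · subst h60
        first
        | decide
        | (simp only [String.reduceEq, if_true, if_false, Bool.false_eq_true,
             eq_self_iff_true, false_or, or_false, true_or, or_true, false_and,
             and_false, true_and, and_true]
           try exact Iff.rfl)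
      simp only [eq_false h60, String.reduceEq, if_true, if_false, Bool.false_eq_true, false_or, or_false, false_and, and_false, true_and, and_true]
      try exact Iff.rfl
    by_cases h61 : b = "path"
    · subst h61
      first
      | decide
      | (simp only [String.reduceEq, if_true, if_false, Bool.false_eq_true,
           eq_self_iff_true, false_or, or_false, true_or, or_true, false_and,
           and_false, true_and, and_true]
         try exact Iff.rfl)
    simp only [eq_false h59, eq_false h61, String.reduceEq, if_true, if_false, Bool.false_eq_true, false_or, or_false, false_and, and_false, true_and, and_true]
    try exact Iff.rfl
  by_cases h62 : a = "settings"
  · subst h62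
    by_cases h63 : b = "get"
    · subst h63
      first
      | decide
      | (simp only [String.reduceEq, if_true, if_false, Bool.false_eq_true,
           eq_self_iff_true, false_or, or_false, true_or, or_true, false_and,
           and_false, true_and, and_true]
         try exact Iff.rfl)
    simp only [eq_false h63, String.reduceEq, if_true, if_false, Bool.false_eq_true, false_or, or_false, false_and, and_false, true_and, and_true]
    try exact Iff.rfl
  by_cases h64 : a = "termux-clipboard-get"
  · subst h64
    first
    | decide
    | (simp only [String.reduceEq, if_true, if_false, Bool.false_eq_true,
         eq_self_iff_true, false_or, or_false, true_or, or_true, false_and,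
         and_false, true_and, and_true]
       try exact Iff.rfl)
  by_cases h65 : a = "termux-clipboard-set"
  · subst h65
    first
    | decide
    | (simp only [String.reduceEq, if_true, if_false, Bool.false_eq_true,
         eq_self_iff_true, false_or, or_false, true_or, or_true, false_and,
         and_false, true_and, and_true]
       try exact Iff.rfl)
  by_cases h66 : a = "termux-open"
  · subst h66
    first
    | decide
    | (simp only [String.reduceEq, if_true, if_false, Bool.false_eq_true,
         eq_self_iff_true, false_or, or_false, true_or, or_true, false_and,
         and_false, true_and, and_true]
       try exact Iff.rfl)
  by_cases h67 : a = "termux-open-url"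
  · subst h67
    first
    | decide
    | (simp only [String.reduceEq, if_true, if_false, Bool.false_eq_true,
         eq_self_iff_true, false_or, or_false, true_or, or_true, false_and,
         and_false, true_and, and_true]
       try exact Iff.rfl)
  by_cases h68 : a = "termux-share"
  · subst h68
    first
    | decide
    | (simp only [String.reduceEq, if_true, if_false, Bool.false_eq_true,
         eq_self_iff_true, false_or, or_false, true_or, or_true, false_and,
         and_false, true_and, and_true]
       try exact Iff.rfl)
  by_cases h69 : a = "termux-toast"
  · subst h69
    first
    | decide
    | (simp only [String.reduceEq, if_true, if_false, Bool.false_eq_true,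
         eq_self_iff_true, false_or, or_false, true_or, or_true, false_and,
         and_false, true_and, and_true]
       try exact Iff.rfl)
  simp only [eq_false h41, eq_false h43, eq_false h47, eq_false h51, eq_false h52, eq_false h57, eq_false h58, eq_false h62, eq_false h64, eq_false h65, eq_false h66, eq_false h67, eq_false h68, eq_false h69, String.reduceEq, if_true, if_false, Bool.false_eq_true, false_or, or_false, false_and, and_false, true_and, and_true]
  try exact Iff.rfl

theorem pv_eq (argv : List String) : safe_shell_allowed_py argv = safe_shell_allowed_py_alt argv := by
  match argv with
  | [] => decide
  | [a] => exact pv_eq1 a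
  | [a, b] => exact pv_eq2 a b
  | a :: b :: c :: rest => exact pv_eq3 a b c rest

-- ===== VERDICT (by name: the statement is the Claim_ definition above) =====
theorem safe_shell_allowed_py_spec : Claim_equal_safe_shell_allowed_py := by
  intro argv _
  exact pv_eq argv
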